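-- pv_equiv track=rewrite | github.com/anonyMSR2025/anonyMSR2025 | Preprocess/process_data.py | split_list_to_smaller_list
-- ===== SOURCE A (Python) =====
-- def split_list_to_smaller_list(list_of_list, token_list_of_list, chunk_size, mode, params):
--     token_lst = [each_list[x] for each_list in token_list_of_list for x in range(1, len(each_list) - 1)]
--     token_map_l = [[fidx, x] for fidx, each_list in enumerate(token_list_of_list) for x in range(1, len(each_list) - 1)]
--     # [file index, token index]
--     lst = [each_list[x] for each_list in list_of_list for x in range(1, len(each_list) - 1)]
--
--     assert len(lst) == len(token_lst)
--     if params["model_name"] == "microsoft/codebert-base":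
--       lst = [lst[x] for x in range(len(lst)) if token_lst[x] not in [1437]]
--       token_map_l = [token_map_l[x] for x in range(len(token_map_l)) if token_lst[x] not in [1437]]
--     assert len(lst) == len(token_map_l)
--
--     if mode == "token":
--         return [[0] + lst[i:i + chunk_size] + [2] for i in range(0, len(lst), chunk_size)], [[[-1, -1]] + token_map_l[i:i + chunk_size] + [[-1, -1]] for i in range(0, len(token_map_l), chunk_size)]
--     elif mode == "att":
--         return [[0] + lst[i:i + chunk_size] + [0] for i in range(0, len(lst), chunk_size)], None
-- ===== SOURCE B (Python) =====
-- def _mids(lol):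
--     # yield (file_index, token_index, value) for the middle elements of every sublist
--     for fidx, sub in enumerate(lol):
--         for x in range(1, len(sub) - 1):
--             yield fidx, x, sub[x]
--
--
-- def _chunk(seq, size, head, tail):
--     # streaming chunker: fill a buffer, emit it framed by sentinels when full, flush the rest
--     if size <= 0:
--         return []  # no positive-size chunks exist; size == 0 is rejected by A anyway
--     out, buf = [], []
--     for v in seq:
--         buf.append(v)
--         if len(buf) == size:
--             out.append([head] + buf + [tail])
--             buf = []
--     if buf:
--         out.append([head] + buf + [tail])
--     return out
--
--
-- def split_list_to_smaller_list(list_of_list, token_list_of_list, chunk_size, mode, params):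
--     drop_filler = params["model_name"] == "microsoft/codebert-base"
--
--     assert sum(len(s) - 2 for s in list_of_list if len(s) > 2) == \
--            sum(len(s) - 2 for s in token_list_of_list if len(s) > 2)
--
--     vals, maps = [], []
--     value_src = _mids(list_of_list)
--     for fidx, x, tok in _mids(token_list_of_list):
--         v = next(value_src)[2]
--         if drop_filler and tok == 1437:
--             continue
--         vals.append(v)
--         maps.append([fidx, x])
--     assert len(vals) == len(maps)
--
--     if mode == "token":
--         return _chunk(vals, chunk_size, 0, 2), _chunk(maps, chunk_size, [-1, -1], [-1, -1])
--     elif mode == "att":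
--         return _chunk(vals, chunk_size, 0, 0), None
-- ===== Notes on version B (the rewrite author's own statement) =====
-- stated objective: alternative
-- what changed: B replaces A's staged comprehensions (flatten, then two index-based filter passes, then range/slice chunking) by one filtered pass over paired (token, value) generator streams that builds vals/maps directly, an arithmetic length assert computed from sublist lengths, and a streaming buffer chunker that emits sentinel-framed chunks as the buffer fills instead of slicing by index.
-- outside the precondition, e.g. on split_list_to_smaller_list([[1, 2, 3]], [[9, 8, 7]], 2, 'other', {'model_name': 'bert'}): A returns None, B returns None
import Mathlib
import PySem

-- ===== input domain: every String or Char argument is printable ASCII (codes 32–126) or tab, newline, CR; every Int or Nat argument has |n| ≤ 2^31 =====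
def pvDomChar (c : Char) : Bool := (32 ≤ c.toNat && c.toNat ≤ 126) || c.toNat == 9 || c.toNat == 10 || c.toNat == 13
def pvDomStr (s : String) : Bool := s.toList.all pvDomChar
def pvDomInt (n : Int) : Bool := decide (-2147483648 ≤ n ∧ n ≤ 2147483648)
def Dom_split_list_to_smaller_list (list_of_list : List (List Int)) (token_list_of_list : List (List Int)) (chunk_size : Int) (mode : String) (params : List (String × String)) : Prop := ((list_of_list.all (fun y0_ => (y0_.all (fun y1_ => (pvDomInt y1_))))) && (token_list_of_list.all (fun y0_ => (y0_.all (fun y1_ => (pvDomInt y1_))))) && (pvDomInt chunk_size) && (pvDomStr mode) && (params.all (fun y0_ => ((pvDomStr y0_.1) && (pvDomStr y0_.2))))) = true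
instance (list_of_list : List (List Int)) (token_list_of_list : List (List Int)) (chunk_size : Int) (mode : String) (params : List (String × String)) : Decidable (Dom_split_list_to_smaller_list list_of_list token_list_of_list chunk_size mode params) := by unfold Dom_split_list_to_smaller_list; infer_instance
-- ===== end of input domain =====

-- B replaces A's staged comprehensions (flatten, two index-based filter passes, range/slice
-- chunking) by one filtered pass over paired (token, value) streams and a streaming buffer
-- chunker (objective: alternative).

-- ===== PORT A =====
def split_list_to_smaller_list (list_of_list : List (List Int)) (token_list_of_list : List (List Int)) (chunk_size : Int) (mode : String) (params : List (String × String)) : List (List Int) × Option (List (List (List Int))) :=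
  let token_lst : List Int := token_list_of_list.flatMap (fun each_list =>
    (PySem.List.pyRange 1 ((each_list.length : Int) - 1) 1).map (fun x => PySem.List.pyGetD each_list x 0))
  let token_map_l : List (List Int) := (PySem.List.enumerate token_list_of_list).flatMap (fun p =>
    (PySem.List.pyRange 1 ((p.2.length : Int) - 1) 1).map (fun x => [p.1, x]))
  let lst : List Int := list_of_list.flatMap (fun each_list =>
    (PySem.List.pyRange 1 ((each_list.length : Int) - 1) 1).map (fun x => PySem.List.pyGetD each_list x 0))
  -- 'assert len(lst) == len(token_lst)' raises exactly outside Pre_; params["model_name"] raises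
  -- (KeyError) when the key is missing, also excluded by Pre_ (getD "" is only reached under Pre_).
  let model := ((params.find? (fun kv => kv.1 == "model_name")).map (fun kv => kv.2)).getD ""
  let lst2 := if model = "microsoft/codebert-base" then
      ((PySem.List.pyRange 0 (lst.length : Int) 1).filter (fun x => PySem.List.pyGetD token_lst x 0 != 1437)).map (fun x => PySem.List.pyGetD lst x 0)
    else lst
  let token_map_l2 := if model = "microsoft/codebert-base" then
      ((PySem.List.pyRange 0 (token_map_l.length : Int) 1).filter (fun x => PySem.List.pyGetD token_lst x 0 != 1437)).map (fun x => PySem.List.pyGetD token_map_l x [])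
    else token_map_l
  if mode = "token" then
    ((PySem.List.pyRange 0 (lst2.length : Int) chunk_size).map (fun i => [0] ++ PySem.List.slice lst2 (some i) (some (i + chunk_size)) ++ [2]),
     some ((PySem.List.pyRange 0 (token_map_l2.length : Int) chunk_size).map (fun i => [[-1, -1]] ++ PySem.List.slice token_map_l2 (some i) (some (i + chunk_size)) ++ [[-1, -1]])))
  else if mode = "att" then
    ((PySem.List.pyRange 0 (lst2.length : Int) chunk_size).map (fun i => [0] ++ PySem.List.slice lst2 (some i) (some (i + chunk_size)) ++ [0]), none)
  else ([], none)  -- Python falls through and returns None (no value of the declared type); outside Pre_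

-- ===== PORT B =====
-- _mids(lol) of Source B: the stream of (file_index, token_index, value) triples the generator yields
def pvMids (lol : List (List Int)) : List (Int × Int × Int) :=
  (PySem.List.enumerate lol).flatMap (fun p =>
    (PySem.List.pyRange 1 ((p.2.length : Int) - 1) 1).map (fun x => (p.1, x, PySem.List.pyGetD p.2 x 0)))

-- _chunk(seq, size, head, tail) of Source B: streaming buffer chunker
def pvChunkStream {α : Type} (size : Int) (head tail : α) (seq : List α) : List (List α) :=
  if size ≤ 0 then []
  else
    let st := seq.foldl (fun (acc : List (List α) × List α) v =>
      let buf := acc.2 ++ [v]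
      if (buf.length : Int) = size then (acc.1 ++ [[head] ++ buf ++ [tail]], []) else (acc.1, buf))
      ([], [])
    if st.2 = [] then st.1 else st.1 ++ [[head] ++ st.2 ++ [tail]]

def split_list_to_smaller_list_alt (list_of_list : List (List Int)) (token_list_of_list : List (List Int)) (chunk_size : Int) (mode : String) (params : List (String × String)) : List (List Int) × Option (List (List (List Int))) :=
  let drop_filler : Bool := ((params.find? (fun kv => kv.1 == "model_name")).map (fun kv => kv.2)).getD "" == "microsoft/codebert-base"
  -- Source B's arithmetic assert (equal middle totals) raises exactly outside Pre_; under Pre_ the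
  -- two streams below have equal length so next() on value_src never raises.
  let vm := ((pvMids token_list_of_list).zip (pvMids list_of_list)).foldl
    (fun (acc : List Int × List (List Int)) q =>
      if drop_filler && (q.1.2.2 == 1437) then acc
      else (acc.1 ++ [q.2.2.2], acc.2 ++ [[q.1.1, q.1.2.1]])) ([], [])
  if mode = "token" then
    (pvChunkStream chunk_size 0 2 vm.1, some (pvChunkStream chunk_size [-1, -1] [-1, -1] vm.2))
  else if mode = "att" then
    (pvChunkStream chunk_size 0 0 vm.1, none)
  else ([], none)

-- ===== PRECONDITION & SPEC =====
-- Pre_ excludes exactly the inputs where the Python A returns no value of the declared type: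
-- a missing "model_name" key (KeyError), a failing 'assert len(lst) == len(token_lst)'
-- (the flattened middles must have equal total length), chunk_size = 0 (ValueError in range),
-- and a mode other than "token"/"att" (A falls through and returns None).
def Pre_split_list_to_smaller_list (list_of_list : List (List Int)) (token_list_of_list : List (List Int)) (chunk_size : Int) (mode : String) (params : List (String × String)) : Prop :=
  (params.find? (fun kv => kv.1 == "model_name")).isSome = true ∧
  chunk_size ≠ 0 ∧
  (mode = "token" ∨ mode = "att") ∧
  (list_of_list.map (fun l => l.length - 2)).sum = (token_list_of_list.map (fun l => l.length - 2)).sum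
instance (list_of_list : List (List Int)) (token_list_of_list : List (List Int)) (chunk_size : Int) (mode : String) (params : List (String × String)) : Decidable (Pre_split_list_to_smaller_list list_of_list token_list_of_list chunk_size mode params) := by unfold Pre_split_list_to_smaller_list; infer_instance

def pvWitness_split_list_to_smaller_list : List (List Int) × List (List Int) × Int × String × (List (String × String)) :=
  ([[1, 2, 3], [4]], [[9, 8, 7], [6]], 2, "token", [("model_name", "microsoft/codebert-base")])

def Spec_split_list_to_smaller_list (list_of_list : List (List Int)) (token_list_of_list : List (List Int)) (chunk_size : Int) (mode : String) (params : List (String × String)) (out : List (List Int) × Option (List (List (List Int)))) : Prop := out = split_list_to_smaller_list_alt list_of_list token_list_of_list chunk_size mode params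
instance (list_of_list : List (List Int)) (token_list_of_list : List (List Int)) (chunk_size : Int) (mode : String) (params : List (String × String)) (out : List (List Int) × Option (List (List (List Int)))) : Decidable (Spec_split_list_to_smaller_list list_of_list token_list_of_list chunk_size mode params out) := by unfold Spec_split_list_to_smaller_list; infer_instance

-- ===== CLAIM (what is proved, stated in full; the proofs are below) =====
def Claim_equal_split_list_to_smaller_list : Prop := ∀ (list_of_list : List (List Int)) (token_list_of_list : List (List Int)) (chunk_size : Int) (mode : String) (params : List (String × String)), Dom_split_list_to_smaller_list list_of_list token_list_of_list chunk_size mode params → Pre_split_list_to_smaller_list list_of_list token_list_of_list chunk_size mode params → Spec_split_list_to_smaller_list list_of_list token_list_of_list chunk_size mode params (split_list_to_smaller_list list_of_list token_list_of_list chunk_size mode params)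

-- ===== LEMMAS AND PROOFS =====

-- length of the flattened middles
lemma pvLenMid (tl : List (List Int)) :
    (tl.flatMap (fun l => (PySem.List.pyRange 1 ((l.length : Int) - 1) 1).map (fun x => PySem.List.pyGetD l x 0))).length
      = (tl.map (fun l => l.length - 2)).sum := by
  simp only [List.length_flatMap, List.length_map, PySem.List.length_pyRange_one]
  congr 1
  apply List.map_congr_left
  intro l _
  omega

-- a flatMap over enumerate that ignores the index is a flatMap over the list
lemma pvFlatMapEnum {β : Type} (tl : List (List Int)) (h : List Int → List β) :
    (PySem.List.enumerate tl).flatMap (fun p => h p.2) = tl.flatMap h := by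
  rw [← List.flatMap_map (fun (p : Int × List Int) => p.2) h (PySem.List.enumerate tl),
      PySem.List.map_snd_enumerate]

-- value projection of the mids stream = A's flattened list
lemma pvMidsVal (lol : List (List Int)) :
    (pvMids lol).map (fun p => p.2.2)
      = lol.flatMap (fun l => (PySem.List.pyRange 1 ((l.length : Int) - 1) 1).map (fun x => PySem.List.pyGetD l x 0)) := by
  unfold pvMids
  rw [List.map_flatMap]
  simp only [List.map_map, Function.comp_def]
  exact pvFlatMapEnum lol (fun l => (PySem.List.pyRange 1 ((l.length : Int) - 1) 1).map (fun x => PySem.List.pyGetD l x 0))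

-- [fidx, x] projection of the mids stream = A's token_map_l
lemma pvMidsMap (lol : List (List Int)) :
    (pvMids lol).map (fun p => [p.1, p.2.1])
      = (PySem.List.enumerate lol).flatMap (fun p =>
          (PySem.List.pyRange 1 ((p.2.length : Int) - 1) 1).map (fun x => [p.1, x])) := by
  unfold pvMids
  rw [List.map_flatMap]
  simp only [List.map_map, Function.comp_def]

lemma pvMidsLen (lol : List (List Int)) :
    (pvMids lol).length = (lol.map (fun l => l.length - 2)).sum := by
  have := congrArg List.length (pvMidsVal lol)
  simpa [pvLenMid] using this

-- B's skip-or-append-to-both fold is a filter + two maps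
lemma pvFoldSkip {α β γ : Type} (p : α → Bool) (f : α → β) (g : α → γ) :
    ∀ (l : List α) (acc : List β × List γ),
      l.foldl (fun acc x => if p x then acc else (acc.1 ++ [f x], acc.2 ++ [g x])) acc
        = (acc.1 ++ (l.filter (fun x => !p x)).map f, acc.2 ++ (l.filter (fun x => !p x)).map g) := by
  intro l
  induction l with
  | nil => intro acc; simp
  | cons x l ih =>
    intro acc
    by_cases hx : p x = true
    · simp [List.foldl_cons, hx, ih]
    · simp [List.foldl_cons, hx, ih]

-- A's index-based select over range(len v) is the zip filter's second projection
lemma pvSelGen {α β γ : Type} (tok : α → Int) (g : β → γ) (dg : γ) :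
    ∀ (u : List α) (v : List β), u.length = v.length →
      ((List.range v.length).filter (fun k => (u.map tok).getD k 0 != 1437)).map (fun k => (v.map g).getD k dg)
        = ((u.zip v).filter (fun q => tok q.1 != 1437)).map (fun q => g q.2) := by
  intro u
  induction u with
  | nil => intro v h; have : v = [] := List.length_eq_zero_iff.mp h.symm; subst this; simp
  | cons x u' ih =>
    intro v h
    match v with
    | [] => simp at h
    | y :: v' =>
      simp only [List.length_cons, List.range_succ_eq_map, List.filter_cons, List.map_cons,
        List.getD_cons_zero, List.filter_map, List.zip_cons_cons]
      by_cases hx : tok x = 1437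
      · simp only [hx, bne_self_eq_false, Bool.false_eq_true, if_false]
        have := ih v' (by simpa using h)
        simpa [Function.comp_def, List.filter_map, List.map_map, List.getD, List.getElem?_cons_succ, List.getElem?_map] using this
      · have hxb : (tok x != 1437) = true := by simpa using hx
        simp only [hxb, if_true, List.map_cons, List.getD_cons_zero]
        have := ih v' (by simpa using h)
        simpa [Function.comp_def, List.filter_map, List.map_map, List.getD, List.getElem?_cons_succ, List.getElem?_map] using this

-- A's index-based select over range(len u) is the zip filter's first projection
lemma pvSelGen1 {α β γ : Type} (tok : α → Int) (f : α → γ) (df : γ) :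
    ∀ (u : List α) (v : List β), u.length = v.length →
      ((List.range u.length).filter (fun k => (u.map tok).getD k 0 != 1437)).map (fun k => (u.map f).getD k df)
        = ((u.zip v).filter (fun q => tok q.1 != 1437)).map (fun q => f q.1) := by
  intro u
  induction u with
  | nil => intro v h; simp
  | cons x u' ih =>
    intro v h
    match v with
    | [] => simp at h
    | y :: v' =>
      simp only [List.length_cons, List.range_succ_eq_map, List.filter_cons, List.map_cons,
        List.getD_cons_zero, List.filter_map, List.zip_cons_cons]
      by_cases hx : tok x = 1437
      · simp only [hx, bne_self_eq_false, Bool.false_eq_true, if_false]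
        have := ih v' (by simpa using h)
        simpa [Function.comp_def, List.filter_map, List.map_map, List.getD, List.getElem?_cons_succ, List.getElem?_map] using this
      · have hxb : (tok x != 1437) = true := by simpa using hx
        simp only [hxb, if_true, List.map_cons, List.getD_cons_zero]
        have := ih v' (by simpa using h)
        simpa [Function.comp_def, List.filter_map, List.map_map, List.getD, List.getElem?_cons_succ, List.getElem?_map] using this

-- range(0, n, step) is empty for a negative step and 0 ≤ n
lemma pvRangeNegNil (n s : Int) (hs : s < 0) (hn : 0 ≤ n) :
    PySem.List.pyRange 0 n s = [] := by
  unfold PySem.List.pyRange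
  rw [if_neg (by omega)]
  rw [if_neg (by omega), if_neg (by omega)]
  simp

-- reference chunker: take c at a time
def pvSC {α : Type} (c : Nat) (mk : List α → List α) : List α → List (List α)
  | [] => []
  | v :: rest => mk (v :: rest.take (c - 1)) :: pvSC c mk (rest.drop (c - 1))
termination_by l => l.length
decreasing_by
  simp only [List.length_drop, List.length_cons]
  omega

lemma pvSC_cons {α : Type} (c : Nat) (hc : 1 ≤ c) (mk : List α → List α) (v : α) (rest : List α) :
    pvSC c mk (v :: rest) = mk ((v :: rest).take c) :: pvSC c mk ((v :: rest).drop c) := by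
  obtain ⟨c', rfl⟩ : ∃ c', c = c' + 1 := ⟨c - 1, by omega⟩
  simp only [pvSC]
  simp

-- splitting off the first chunk of a positive-step range starting at 0
lemma pvRangePosCons (cs n : Int) (hcs : 0 < cs) (hn : 0 < n) :
    PySem.List.pyRange 0 n cs = 0 :: (PySem.List.pyRange 0 (n - cs) cs).map (· + cs) := by
  rw [PySem.List.pyRange_of_pos _ _ hcs, PySem.List.pyRange_of_pos _ _ hcs]
  have hm : (if (0:Int) < n then ((n - 0 + cs - 1) / cs).toNat else 0)
      = 1 + (if (0:Int) < n - cs then ((n - cs - 0 + cs - 1) / cs).toNat else 0) := by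
    rw [if_pos hn]
    by_cases h : (0:Int) < n - cs
    · rw [if_pos h]
      have h1 : n - 0 + cs - 1 = (n - cs - 0 + cs - 1) + 1 * cs := by ring
      rw [h1, Int.add_mul_ediv_right _ _ (by omega)]
      have h2 : 0 ≤ (n - cs - 0 + cs - 1) / cs := Int.ediv_nonneg (by omega) (by omega)
      omega
    · rw [if_neg h]
      have h1 : n - 0 + cs - 1 = (n - 1) + 1 * cs := by ring
      rw [h1, Int.add_mul_ediv_right _ _ (by omega)]
      have h2 : (n - 1) / cs = 0 := Int.ediv_eq_zero_of_lt (by omega) (by omega)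
      omega
  rw [hm, List.range_add, List.map_append, List.map_map, List.map_map]
  simp only [List.range_one, List.map_cons, List.map_nil, List.singleton_append,
    Nat.cast_zero, mul_zero, add_zero, List.cons.injEq]
  refine ⟨by simp, ?_⟩
  apply List.map_congr_left
  intro k _
  simp only [Function.comp_def]
  push_cast
  ring

-- A's range/slice chunking equals the take-c-at-a-time chunker
lemma pvACeq {α : Type} (cs : Int) (hcs : 0 < cs) (hd tl : α) :
    ∀ (n : Nat) (seq : List α), seq.length = n →
      (PySem.List.pyRange 0 (seq.length : Int) cs).map
          (fun i => [hd] ++ PySem.List.slice seq (some i) (some (i + cs)) ++ [tl])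
        = pvSC cs.toNat (fun b => [hd] ++ b ++ [tl]) seq := by
  intro n
  induction n using Nat.strong_induction_on with
  | _ n ih =>
    intro seq hlen
    match seq with
    | [] => simp [pvSC, PySem.List.pyRange_of_pos _ _ hcs]
    | v :: rest =>
      have hpos : (0:Int) < ((v :: rest).length : Int) := by simp
      rw [pvRangePosCons cs _ hcs hpos, pvSC_cons cs.toNat (by omega)]
      simp only [List.map_cons, List.map_map]
      congr 1
      · -- head chunk: slice seq 0 cs = take cs.toNat seq
        have h0 : (0:Int) + cs = cs := by ring
        rw [h0, PySem.List.slice_zero_start, PySem.List.slice_to _ (le_of_lt hcs)]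
      · -- tail chunks
        have hdlen : (((v :: rest).drop cs.toNat).length : Int)
            = if cs ≤ ((v :: rest).length : Int) then ((v :: rest).length : Int) - cs else 0 := by
          rw [List.length_drop]
          split_ifs with h <;> omega
        have ihd := ih ((v :: rest).drop cs.toNat).length
            (by rw [List.length_drop]; omega) ((v :: rest).drop cs.toNat) rfl
        rw [← ihd]
        by_cases hle : cs ≤ ((v :: rest).length : Int)
        · rw [hdlen, if_pos hle]
          apply List.map_congr_left
          intro i hi
          have hmem := (PySem.List.mem_pyRange_iff_of_pos hcs i).mp hi
          have h0i : 0 ≤ i := hmem.1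
          simp only [Function.comp_def]
          have hslice : PySem.List.slice (v :: rest) (some (i + cs)) (some (i + cs + cs))
              = PySem.List.slice ((v :: rest).drop cs.toNat) (some i) (some (i + cs)) := by
            rw [PySem.List.slice_toNat _ (by omega) (by omega),
                PySem.List.slice_toNat _ (by omega) (by omega), List.drop_drop]
            congr 1
            · omega
            · congr 1
              omega
          rw [hslice]
        · -- n < cs: both sides are maps over empty ranges
          have h1 : PySem.List.pyRange 0 (((v :: rest).length : Int) - cs) cs = [] := by
            rw [PySem.List.pyRange_of_pos _ _ hcs, if_neg (by omega)]
            simp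
          have h2 : PySem.List.pyRange 0 ((((v :: rest).drop cs.toNat).length : Int)) cs = [] := by
            rw [PySem.List.pyRange_of_pos _ _ hcs, if_neg (by rw [List.length_drop]; omega)]
            simp
          rw [h1, h2]
          simp

-- the streaming fold does not emit while the buffer stays short
lemma pvFoldNoEmit {α : Type} (cs : Int) (hd tl : α) :
    ∀ (xs : List α) (done : List (List α)) (buf : List α),
      ((buf.length : Int) + xs.length < cs) →
      xs.foldl (fun (acc : List (List α) × List α) v =>
          let b := acc.2 ++ [v]
          if (b.length : Int) = cs then (acc.1 ++ [[hd] ++ b ++ [tl]], []) else (acc.1, b))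
        (done, buf) = (done, buf ++ xs) := by
  intro xs
  induction xs with
  | nil => intro done buf _; simp
  | cons v xs ih =>
    intro done buf h
    simp only [List.foldl_cons]
    rw [if_neg (by simp only [List.length_append, List.length_cons, List.length_nil] at h ⊢; push_cast at h ⊢; omega)]
    rw [ih done (buf ++ [v]) (by simp only [List.length_append, List.length_cons, List.length_nil] at h ⊢; push_cast at h ⊢; omega)]
    simp

-- the streaming fold emits exactly when the buffer plus the rest fills one chunk
lemma pvFoldEmit {α : Type} (cs : Int) (hd tl : α) :
    ∀ (xs : List α) (done : List (List α)) (buf : List α),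
      ((buf.length : Int) + xs.length = cs) → xs ≠ [] →
      xs.foldl (fun (acc : List (List α) × List α) v =>
          let b := acc.2 ++ [v]
          if (b.length : Int) = cs then (acc.1 ++ [[hd] ++ b ++ [tl]], []) else (acc.1, b))
        (done, buf) = (done ++ [[hd] ++ (buf ++ xs) ++ [tl]], []) := by
  intro xs
  induction xs with
  | nil => intro done buf _ hne; exact absurd rfl hne
  | cons v xs ih =>
    intro done buf h _
    simp only [List.foldl_cons]
    match xs with
    | [] =>
      rw [if_pos (by simp only [List.length_append, List.length_cons, List.length_nil] at h ⊢; push_cast at h ⊢; omega)]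
      simp
    | w :: xs' =>
      rw [if_neg (by simp only [List.length_append, List.length_cons, List.length_nil] at h ⊢; push_cast at h ⊢; omega)]
      rw [ih done (buf ++ [v]) (by simp only [List.length_append, List.length_cons, List.length_nil] at h ⊢; push_cast at h ⊢; omega) (by simp)]
      simp

-- the streaming chunker equals the take-c-at-a-time chunker (positive size)
lemma pvStreamEq {α : Type} (cs : Int) (hcs : 0 < cs) (hd tl : α) :
    ∀ (n : Nat) (seq : List α) (done : List (List α)), seq.length = n →
      (let st := seq.foldl (fun (acc : List (List α) × List α) v =>
          let b := acc.2 ++ [v]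
          if (b.length : Int) = cs then (acc.1 ++ [[hd] ++ b ++ [tl]], []) else (acc.1, b))
        (done, []) ;
       if st.2 = [] then st.1 else st.1 ++ [[hd] ++ st.2 ++ [tl]])
        = done ++ pvSC cs.toNat (fun b => [hd] ++ b ++ [tl]) seq := by
  intro n
  induction n using Nat.strong_induction_on with
  | _ n ih =>
    intro seq done hlen
    match seq with
    | [] => simp [pvSC]
    | v :: rest =>
      by_cases hlt : (((v :: rest).length : Int)) < cs
      · rw [pvFoldNoEmit cs hd tl (v :: rest) done [] (by simpa using hlt)]
        simp only [List.nil_append]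
        rw [if_neg (by simp)]
        rw [pvSC_cons cs.toNat (by omega)]
        have ht : (v :: rest).take cs.toNat = v :: rest := by
          apply List.take_of_length_le
          simp at hlt ⊢; omega
        have hdp : (v :: rest).drop cs.toNat = [] := by
          apply List.drop_eq_nil_of_le
          simp at hlt ⊢; omega
        rw [ht, hdp]
        simp [pvSC]
      · -- cs ≤ length: first chunk emits, recurse on the rest
        have hsplit : v :: rest = (v :: rest).take cs.toNat ++ (v :: rest).drop cs.toNat :=
          (List.take_append_drop _ _).symm
        have htlen : (((v :: rest).take cs.toNat).length : Int) = cs := by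
          rw [List.length_take]
          simp only [List.length_cons] at hlt ⊢
          omega
        conv_lhs => rw [hsplit]
        rw [List.foldl_append]
        rw [pvFoldEmit cs hd tl ((v :: rest).take cs.toNat) done []
          (by rw [htlen]; simp) (by intro hnil; rw [hnil] at htlen; simp at htlen; omega)]
        simp only [List.nil_append]
        have ihd := ih ((v :: rest).drop cs.toNat).length
          (by rw [List.length_drop]; simp only [List.length_cons] at hlen ⊢; omega) ((v :: rest).drop cs.toNat)
          (done ++ [[hd] ++ (v :: rest).take cs.toNat ++ [tl]]) rfl
        simp only at ihd
        rw [ihd]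
        rw [pvSC_cons cs.toNat (by omega)]
        simp

-- pvChunkStream computes A's range/slice chunking for every nonzero size
lemma pvChunkStreamEq {α : Type} (cs : Int) (hcs : cs ≠ 0) (hd tl : α) (seq : List α) :
    pvChunkStream cs hd tl seq
      = (PySem.List.pyRange 0 (seq.length : Int) cs).map
          (fun i => [hd] ++ PySem.List.slice seq (some i) (some (i + cs)) ++ [tl]) := by
  unfold pvChunkStream
  by_cases hneg : cs ≤ 0
  · rw [if_pos hneg, pvRangeNegNil _ _ (by omega) (by positivity), List.map_nil]
  · rw [if_neg hneg]
    have h1 := pvStreamEq cs (by omega) hd tl seq.length seq [] rfl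
    simp only [List.nil_append] at h1
    rw [h1]
    exact (pvACeq cs (by omega) hd tl seq.length seq rfl).symm

-- ===== VERDICT (by name: the statement is the Claim_ definition above) =====
theorem split_list_to_smaller_list_spec : Claim_equal_split_list_to_smaller_list := by
  intro ll tl cs mode params _dom hpre
  obtain ⟨hkey, hcs, hmode, hsum⟩ := hpre
  unfold Spec_split_list_to_smaller_list
  unfold split_list_to_smaller_list split_list_to_smaller_list_alt
  simp only []
  -- name the two mid streams and A's three lists
  set u := pvMids tl with hu
  set v := pvMids ll with hv
  have hlen : u.length = v.length := by
    rw [hu, hv, pvMidsLen, pvMidsLen, hsum]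
  have htok : tl.flatMap (fun l => (PySem.List.pyRange 1 ((l.length : Int) - 1) 1).map (fun x => PySem.List.pyGetD l x 0)) = u.map (fun p => p.2.2) := (pvMidsVal tl).symm
  have hlst : ll.flatMap (fun l => (PySem.List.pyRange 1 ((l.length : Int) - 1) 1).map (fun x => PySem.List.pyGetD l x 0)) = v.map (fun p => p.2.2) := (pvMidsVal ll).symm
  have hmap : (PySem.List.enumerate tl).flatMap (fun p => (PySem.List.pyRange 1 ((p.2.length : Int) - 1) 1).map (fun x => [p.1, x])) = u.map (fun p => [p.1, p.2.1]) := (pvMidsMap tl).symm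
  rw [htok, hlst, hmap]
  rw [pvFoldSkip]
  set model := ((params.find? (fun kv => kv.1 == "model_name")).map (fun kv => kv.2)).getD "" with hmodel
  by_cases hm : model = "microsoft/codebert-base"
  · have hb : (model == "microsoft/codebert-base") = true := by simp [hm]
    rw [if_pos hm, if_pos hm, hb]
    simp only [Bool.true_and]
    have hval : ((PySem.List.pyRange 0 (((v.map (fun p => p.2.2)).length : Int)) 1).filter
          (fun x => PySem.List.pyGetD (u.map (fun p => p.2.2)) x 0 != 1437)).map
          (fun x => PySem.List.pyGetD (v.map (fun p => p.2.2)) x 0)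
        = ((u.zip v).filter (fun q => q.1.2.2 != 1437)).map (fun q => q.2.2.2) := by
      rw [PySem.List.pyRange_zero_natCast, List.filter_map, List.map_map]
      simp only [Function.comp_def, PySem.List.pyGetD_natCast]
      simpa using pvSelGen (fun p : Int × Int × Int => p.2.2) (fun p : Int × Int × Int => p.2.2) 0 u v hlen
    have hmapsel : ((PySem.List.pyRange 0 (((u.map (fun p => [p.1, p.2.1])).length : Int)) 1).filter
          (fun x => PySem.List.pyGetD (u.map (fun p => p.2.2)) x 0 != 1437)).map
          (fun x => PySem.List.pyGetD (u.map (fun p => [p.1, p.2.1])) x ([] : List Int))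
        = ((u.zip v).filter (fun q => q.1.2.2 != 1437)).map (fun q => [q.1.1, q.1.2.1]) := by
      rw [PySem.List.pyRange_zero_natCast, List.filter_map, List.map_map]
      simp only [Function.comp_def, PySem.List.pyGetD_natCast]
      simpa using pvSelGen1 (fun p : Int × Int × Int => p.2.2) (fun p : Int × Int × Int => [p.1, p.2.1]) ([] : List Int) u v hlen
    rw [hval, hmapsel]
    rcases hmode with h | h
    · rw [if_pos h, if_pos h]
      simp only [List.nil_append]
      rw [pvChunkStreamEq cs hcs, pvChunkStreamEq cs hcs]
      simp only [bne]
    · have hne : mode ≠ "token" := by rw [h]; decide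
      rw [if_neg hne, if_pos h, if_neg hne, if_pos h]
      simp only [List.nil_append]
      rw [pvChunkStreamEq cs hcs]
      simp only [bne]
  · have hb : (model == "microsoft/codebert-base") = false := by simp [hm]
    rw [if_neg hm, if_neg hm, hb]
    simp only [Bool.false_and, Bool.not_false, List.filter_true, List.nil_append]
    have hval : (u.zip v).map (fun q => q.2.2.2) = v.map (fun p => p.2.2) := by
      have : (u.zip v).map Prod.snd = v := List.map_snd_zip (le_of_eq hlen.symm)
      calc (u.zip v).map (fun q => q.2.2.2) = ((u.zip v).map Prod.snd).map (fun p => p.2.2) := by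
            rw [List.map_map]; rfl
        _ = v.map (fun p => p.2.2) := by rw [this]
    have hmap2 : (u.zip v).map (fun q => [q.1.1, q.1.2.1]) = u.map (fun p => [p.1, p.2.1]) := by
      have : (u.zip v).map Prod.fst = u := List.map_fst_zip (le_of_eq hlen)
      calc (u.zip v).map (fun q => [q.1.1, q.1.2.1]) = ((u.zip v).map Prod.fst).map (fun p => [p.1, p.2.1]) := by
            rw [List.map_map]; rfl
        _ = u.map (fun p => [p.1, p.2.1]) := by rw [this]
    rw [hval, hmap2]
    rcases hmode with h | h
    · rw [if_pos h, if_pos h]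
      rw [pvChunkStreamEq cs hcs, pvChunkStreamEq cs hcs]
    · have hne : mode ≠ "token" := by rw [h]; decide
      rw [if_neg hne, if_pos h, if_neg hne, if_pos h]
      rw [pvChunkStreamEq cs hcs]
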